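-- pv_equiv track=rewrite | github.com/jwohlin2/CAD_Quoting_Tool | appkit/ui/planner_render.py | _preferred_order_then_alpha
-- ===== SOURCE A (Python) =====
-- from collections.abc import Iterable, Mapping as _MappingABC, MutableMapping as _MutableMappingABC, Sequence
--
-- _PREFERRED_BUCKET_VIEW_ORDER: tuple[str, ...] = (
--     "programming",
--     "programming_amortized",
--     "fixture_build",
--     "fixture_build_amortized",
--     "milling",
--     "drilling",
--     "counterbore",
--     "countersink",
--     "tapping",
--     "grinding",
--     "finishing_deburr",
--     "saw_waterjet",
--     "wire_edm",
--     "sinker_edm",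
--     "inspection",
--     "assembly",
--     "toolmaker_support",
--     "packaging",
--     "ehs_compliance",
--     "turning",
--     "lapping_honing",
-- )
--
-- def _preferred_order_then_alpha(keys: Iterable[str]) -> list[str]:
--     seen: set[str] = set()
--     remaining = {key for key in keys if key}
--     ordered: list[str] = []
--
--     for preferred in _PREFERRED_BUCKET_VIEW_ORDER:
--         if preferred in remaining:
--             ordered.append(preferred)
--             seen.add(preferred)
--     remaining -= seen
--
--     if remaining:
--         ordered.extend(sorted(remaining))
--
--     return ordered
-- ===== SOURCE B (Python) =====
-- # Single index-driven sort: rank table for preferred names, composite (rank, name) key.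
-- _PREFERRED_BUCKET_VIEW_ORDER = (
--     "programming", "programming_amortized", "fixture_build", "fixture_build_amortized",
--     "milling", "drilling", "counterbore", "countersink", "tapping", "grinding",
--     "finishing_deburr", "saw_waterjet", "wire_edm", "sinker_edm", "inspection",
--     "assembly", "toolmaker_support", "packaging", "ehs_compliance", "turning",
--     "lapping_honing",
-- )
--
-- def _preferred_order_then_alpha(keys):
--     rank = {name: i for i, name in enumerate(_PREFERRED_BUCKET_VIEW_ORDER)}
--     n = len(_PREFERRED_BUCKET_VIEW_ORDER)
--     unique = {k for k in keys if k}
--     return sorted(unique, key=lambda k: (rank.get(k, n), k))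
-- ===== Notes on version B (the rewrite author's own statement) =====
-- stated objective: simpler
-- what changed: Replaced the two-phase scan (walk the preferred tuple collecting hits, then append the sorted leftovers) with one sorted() call over the deduplicated keys using a composite (rank, name) key built from an enumerate rank table.
import Mathlib
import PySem

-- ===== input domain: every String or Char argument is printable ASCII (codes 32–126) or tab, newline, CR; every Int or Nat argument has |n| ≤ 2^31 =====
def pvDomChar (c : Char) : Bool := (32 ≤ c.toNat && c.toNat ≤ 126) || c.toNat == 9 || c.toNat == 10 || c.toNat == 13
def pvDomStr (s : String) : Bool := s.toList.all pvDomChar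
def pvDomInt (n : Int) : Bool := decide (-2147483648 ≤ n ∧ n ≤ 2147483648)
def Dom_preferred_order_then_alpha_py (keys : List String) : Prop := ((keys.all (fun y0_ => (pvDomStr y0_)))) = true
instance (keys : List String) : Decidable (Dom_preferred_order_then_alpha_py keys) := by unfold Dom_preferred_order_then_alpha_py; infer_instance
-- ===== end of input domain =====

-- B replaces A's two-phase scan (preferred walk, then sorted leftovers) by one sorted() over the
-- deduplicated keys with a composite (rank, name) key; objective: simpler.

-- module-level constant _PREFERRED_BUCKET_VIEW_ORDER (shared by both versions in Python)
def pvPreferredOrder : List String :=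
  ["programming", "programming_amortized", "fixture_build", "fixture_build_amortized",
   "milling", "drilling", "counterbore", "countersink", "tapping", "grinding",
   "finishing_deburr", "saw_waterjet", "wire_edm", "sinker_edm", "inspection",
   "assembly", "toolmaker_support", "packaging", "ehs_compliance", "turning",
   "lapping_honing"]

-- ===== PORT A =====
def preferred_order_then_alpha_py (keys : List String) : List String :=
  let remaining : PySem.Set String := PySem.Set.ofList (keys.filter (fun key => decide (key ≠ "")))
  let st := pvPreferredOrder.foldl
    (fun (st : List String × PySem.Set String) preferred =>
      if PySem.Set.contains remaining preferred then
        (st.1 ++ [preferred], PySem.Set.add st.2 preferred)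
      else st)
    ([], PySem.Set.empty)
  let ordered := st.1
  let seen := st.2
  let remaining2 := PySem.Set.diff remaining seen
  if remaining2 ≠ [] then ordered ++ PySem.List.sorted remaining2 (fun x => x) false else ordered

-- ===== PORT B =====
def preferred_order_then_alpha_py_alt (keys : List String) : List String :=
  let rank : PySem.Dict String Int :=
    (PySem.List.enumerate pvPreferredOrder 0).foldl
      (fun d p => PySem.Dict.insert d p.2 p.1) PySem.Dict.empty
  let n : Int := (pvPreferredOrder.length : Int)
  let unique : PySem.Set String := PySem.Set.ofList (keys.filter (fun k => decide (k ≠ "")))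
  PySem.List.sorted2 unique (fun k => PySem.Dict.getD rank k n) (fun k => k) false

-- ===== PRECONDITION & SPEC =====
def Spec_preferred_order_then_alpha_py (keys : List String) (out : List String) : Prop := out = preferred_order_then_alpha_py_alt keys
instance (keys : List String) (out : List String) : Decidable (Spec_preferred_order_then_alpha_py keys out) := by unfold Spec_preferred_order_then_alpha_py; infer_instance

-- ===== CLAIM (what is proved, stated in full; the proofs are below) =====
def Claim_equal_preferred_order_then_alpha_py : Prop := ∀ (keys : List String), Dom_preferred_order_then_alpha_py keys → Spec_preferred_order_then_alpha_py keys (preferred_order_then_alpha_py keys)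

-- ===== LEMMAS AND PROOFS =====

-- B's rank dictionary and composite-key strict order, as used by the sorted2 call in the B port.
def pvRankD : PySem.Dict String Int :=
  (PySem.List.enumerate pvPreferredOrder 0).foldl
    (fun d p => PySem.Dict.insert d p.2 p.1) PySem.Dict.empty

def pvRnk (k : String) : Int := PySem.Dict.getD pvRankD k (pvPreferredOrder.length : Int)

def pvLexB (a b : String) : Bool :=
  decide (pvRnk a < pvRnk b) || (!decide (pvRnk b < pvRnk a) && decide (a < b))

lemma pvLexB_trans (a b c : String) (h1 : pvLexB a b = true) (h2 : pvLexB b c = true) :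
    pvLexB a c = true := by
  simp only [pvLexB, Bool.or_eq_true, Bool.and_eq_true, Bool.not_eq_true', decide_eq_true_eq,
    decide_eq_false_iff_not] at *
  rcases h1 with h1 | ⟨h1, h1'⟩ <;> rcases h2 with h2 | ⟨h2, h2'⟩
  · exact Or.inl (by omega)
  · exact Or.inl (by omega)
  · exact Or.inl (by omega)
  · exact Or.inr ⟨by omega, lt_trans h1' h2'⟩

lemma pvLexB_total (a b : String) (h : a ≠ b) : pvLexB a b = true ∨ pvLexB b a = true := by
  simp only [pvLexB, Bool.or_eq_true, Bool.and_eq_true, Bool.not_eq_true', decide_eq_true_eq,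
    decide_eq_false_iff_not]
  rcases lt_trichotomy (pvRnk a) (pvRnk b) with hr | hr | hr
  · exact Or.inl (Or.inl hr)
  · rcases lt_or_gt_of_ne h with hs | hs
    · exact Or.inl (Or.inr ⟨fun hlt => absurd hr (ne_of_gt hlt), hs⟩)
    · exact Or.inr (Or.inr ⟨fun hlt => absurd hr.symm (ne_of_gt hlt), hs⟩)
  · exact Or.inr (Or.inl hr)

lemma pvLexB_asymm (a b : String) (h1 : pvLexB a b = true) (h2 : pvLexB b a = true) : a = b := by
  simp only [pvLexB, Bool.or_eq_true, Bool.and_eq_true, Bool.not_eq_true', decide_eq_true_eq,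
    decide_eq_false_iff_not] at *
  rcases h1 with h1 | ⟨h1, h1'⟩ <;> rcases h2 with h2 | ⟨h2, h2'⟩
  · exact absurd h2 (lt_asymm h1)
  · exact absurd h1 h2
  · exact absurd h2 h1
  · exact absurd h2' (lt_asymm h1')

-- insertion into a pvLexB-pairwise list of new elements stays pairwise (generic strict order)
lemma pvInsertBy_pairwise {α : Type} (B : α → α → Bool)
    (htr : ∀ a b c, B a b = true → B b c = true → B a c = true)
    (hto : ∀ a b : α, a ≠ b → B a b = true ∨ B b a = true)
    (x : α) : ∀ (acc : List α), x ∉ acc → acc.Pairwise (fun a b => B a b = true) →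
    (PySem.List.insertBy B x acc).Pairwise (fun a b => B a b = true)
  | [], _, _ => by simp [PySem.List.insertBy]
  | y :: ys, hx, hp => by
    simp only [PySem.List.insertBy]
    rcases List.pairwise_cons.mp hp with ⟨hy, hys⟩
    by_cases hbxy : B x y = true
    · simp only [hbxy, if_true]
      refine List.pairwise_cons.mpr ⟨?_, hp⟩
      intro z hz
      rcases List.mem_cons.mp hz with rfl | hz
      · exact hbxy
      · exact htr x y z hbxy (hy z hz)
    · simp only [hbxy, Bool.false_eq_true, if_false]
      have hxy : x ≠ y := fun h => hx (h ▸ List.mem_cons_self)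
      have hyx : B y x = true := (hto x y hxy).resolve_left hbxy
      have hxys : x ∉ ys := fun h => hx (List.mem_cons_of_mem _ h)
      refine List.pairwise_cons.mpr ⟨?_, pvInsertBy_pairwise B htr hto x ys hxys hys⟩
      intro z hz
      rcases (PySem.List.mem_insertBy _ _ _ _).mp hz with rfl | hz
      · exact hyx
      · exact hy z hz

lemma pvFoldl_insertBy_pairwise {α : Type} (B : α → α → Bool)
    (htr : ∀ a b c, B a b = true → B b c = true → B a c = true)
    (hto : ∀ a b : α, a ≠ b → B a b = true ∨ B b a = true) :
    ∀ (xs acc : List α), xs.Nodup → (∀ x ∈ xs, x ∉ acc) →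
      acc.Pairwise (fun a b => B a b = true) →
      (xs.foldl (fun acc x => PySem.List.insertBy B x acc) acc).Pairwise (fun a b => B a b = true)
  | [], acc, _, _, hp => hp
  | x :: xs, acc, hnd, hdisj, hp => by
    simp only [List.foldl_cons]
    rcases List.nodup_cons.mp hnd with ⟨hx, hnd'⟩
    refine pvFoldl_insertBy_pairwise B htr hto xs _ hnd' ?_
      (pvInsertBy_pairwise B htr hto x acc (hdisj x List.mem_cons_self) hp)
    intro y hy hmem
    rcases (PySem.List.mem_insertBy _ _ _ _).mp hmem with rfl | hmem
    · exact hx hy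
    · exact hdisj y (List.mem_cons_of_mem _ hy) hmem

-- the A-side loop over the preferred list, characterised
lemma pvAFold (u : PySem.Set String) :
    ∀ (ps : List String) (ord : List String) (seen : PySem.Set String),
      List.foldl
        (fun (st : List String × PySem.Set String) preferred =>
          if PySem.Set.contains u preferred then
            (st.1 ++ [preferred], PySem.Set.add st.2 preferred)
          else st)
        (ord, seen) ps
      = (ord ++ ps.filter (fun p => PySem.Set.contains u p),
         PySem.Set.update seen (ps.filter (fun p => PySem.Set.contains u p)))
  | [], ord, seen => by simp [PySem.Set.update]
  | p :: ps, ord, seen => by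
    by_cases hc : PySem.Set.contains u p = true
    · simp only [List.foldl_cons, hc, if_true, List.filter_cons_of_pos hc,
        PySem.Set.update_cons, pvAFold u ps (ord ++ [p]) (PySem.Set.add seen p)]
      rw [List.append_assoc]
      rfl
    · rw [List.foldl_cons, if_neg hc, pvAFold u ps ord seen, List.filter_cons]
      simp only [eq_false_of_ne_true hc, Bool.false_eq_true, if_false]

-- keys of B's rank dict are exactly the preferred names
lemma pvRnk_keys (x : String) : x ∈ pvRankD.keys ↔ x ∈ pvPreferredOrder := by
  unfold pvRankD
  rw [PySem.Dict.keys_foldl_insert_key]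
  constructor
  · intro h
    rcases (PySem.Set.mem_update _ _ _).mp h with h | h
    · simp [PySem.Dict.empty, PySem.Dict.keys] at h
    · rcases List.mem_map.mp h with ⟨p, hp, rfl⟩
      rcases (PySem.List.mem_enumerate_iff _ _ _).mp hp with ⟨k, hk, rfl⟩
      exact List.getElem_mem hk
  · intro h
    refine (PySem.Set.mem_update _ _ _).mpr (Or.inr ?_)
    rcases List.mem_iff_getElem.mp h with ⟨k, hk, rfl⟩
    exact List.mem_map.mpr ⟨((0 : Int) + k, pvPreferredOrder[k]),
      (PySem.List.mem_enumerate_iff _ _ _).mpr ⟨k, hk, rfl⟩, rfl⟩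

lemma pvRnk_out (x : String) (h : x ∉ pvPreferredOrder) : pvRnk x = (pvPreferredOrder.length : Int) := by
  unfold pvRnk
  rw [PySem.Dict.getD_eq_get?_getD,
    (PySem.Dict.get?_eq_none_iff_not_mem_keys _ _).mpr (fun hm => h ((pvRnk_keys x).mp hm))]
  rfl

lemma pvRnk_in (x : String) (h : x ∈ pvPreferredOrder) : pvRnk x < (pvPreferredOrder.length : Int) := by
  have hall : pvPreferredOrder.all (fun a => decide (pvRnk a < (pvPreferredOrder.length : Int))) = true := by decide
  exact of_decide_eq_true (List.all_eq_true.mp hall x h)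

lemma pvPreferred_pairwise : pvPreferredOrder.Pairwise (fun a b => pvLexB a b = true) := by decide

lemma pvPreferred_nodup : pvPreferredOrder.Nodup := by decide

-- ===== VERDICT (by name: the statement is the Claim_ definition above) =====
theorem preferred_order_then_alpha_py_spec : Claim_equal_preferred_order_then_alpha_py := by
  intro keys _
  unfold Spec_preferred_order_then_alpha_py preferred_order_then_alpha_py preferred_order_then_alpha_py_alt
  set u : PySem.Set String := PySem.Set.ofList (keys.filter (fun key => decide (key ≠ ""))) with hu
  simp only [pvAFold u pvPreferredOrder [] PySem.Set.empty, List.nil_append]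
  set f : String → Bool := fun p => PySem.Set.contains u p with hf
  set ordered := pvPreferredOrder.filter f with hord
  set seen := PySem.Set.update PySem.Set.empty (pvPreferredOrder.filter f) with hseen
  set rest := PySem.Set.diff u seen with hrest
  have hund : u.Nodup := PySem.Set.nodup_ofList _
  -- memberships
  have hmem_seen : ∀ x, x ∈ seen ↔ (x ∈ pvPreferredOrder ∧ x ∈ u) := by
    intro x
    rw [hseen, PySem.Set.mem_update]
    simp [PySem.Set.empty, List.mem_filter, hf]
  have hmem_rest : ∀ x, x ∈ rest ↔ (x ∈ u ∧ x ∉ pvPreferredOrder) := by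
    intro x
    rw [hrest, PySem.Set.mem_diff]
    constructor
    · rintro ⟨hxu, hxs⟩
      exact ⟨hxu, fun hp => hxs ((hmem_seen x).mpr ⟨hp, hxu⟩)⟩
    · rintro ⟨hxu, hxp⟩
      exact ⟨hxu, fun hs => hxp ((hmem_seen x).mp hs).1⟩
  have hmem_ord : ∀ x, x ∈ ordered ↔ (x ∈ pvPreferredOrder ∧ x ∈ u) := by
    intro x
    simp [hord, List.mem_filter, hf]
  -- branch removal: if rest = [] the sorted tail is [] too
  have hA : (if rest ≠ [] then ordered ++ PySem.List.sorted rest (fun x => x) false else ordered)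
      = ordered ++ PySem.List.sorted rest (fun x => x) false := by
    by_cases h : rest = []
    · rw [if_neg (not_not_intro h), h, (PySem.List.sorted_eq_nil_iff _ _ _).mpr rfl, List.append_nil]
    · rw [if_pos h]
  rw [hA]
  set sortedRest := PySem.List.sorted rest (fun x => x) false with hsr
  -- nodups
  have hrestnd : rest.Nodup := PySem.Set.nodup_diff u seen hund
  have hsrnd : sortedRest.Nodup := (PySem.List.sorted_perm rest (fun x => x) false).nodup_iff.mpr hrestnd
  have hordnd : ordered.Nodup := List.Nodup.filter f pvPreferred_nodup
  have hsr_mem : ∀ x, x ∈ sortedRest ↔ x ∈ rest := fun x =>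
    (PySem.List.sorted_perm rest (fun x => x) false).mem_iff
  -- A's output is a permutation of u
  have hAperm : (ordered ++ sortedRest).Perm u := by
    refine (List.perm_ext_iff_of_nodup ?_ hund).mpr ?_
    · refine List.Nodup.append hordnd hsrnd ?_
      intro x hxo hxs
      exact ((hmem_rest x).mp ((hsr_mem x).mp hxs)).2 ((hmem_ord x).mp hxo).1
    · intro x
      simp only [List.mem_append, hmem_ord x, hsr_mem x, hmem_rest x]
      constructor
      · rintro (⟨_, h⟩ | ⟨h, _⟩) <;> exact h
      · intro h
        by_cases hp : x ∈ pvPreferredOrder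
        · exact Or.inl ⟨hp, h⟩
        · exact Or.inr ⟨h, hp⟩
  -- pairwise pvLexB of A's output
  have hApw : (ordered ++ sortedRest).Pairwise (fun a b => pvLexB a b = true) := by
    rw [List.pairwise_append]
    refine ⟨pvPreferred_pairwise.sublist List.filter_sublist, ?_, ?_⟩
    · have hle : sortedRest.Pairwise (fun a b : String => a ≤ b) :=
        PySem.List.sorted_pairwise rest (fun x => x)
      have hne : sortedRest.Pairwise (fun a b : String => a ≠ b) := hsrnd
      refine (hle.and hne).imp_of_mem ?_
      intro a b ha hb hab
      have hra : pvRnk a = (pvPreferredOrder.length : Int) :=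
        pvRnk_out a ((hmem_rest a).mp ((hsr_mem a).mp ha)).2
      have hrb : pvRnk b = (pvPreferredOrder.length : Int) :=
        pvRnk_out b ((hmem_rest b).mp ((hsr_mem b).mp hb)).2
      simp only [pvLexB, Bool.or_eq_true, Bool.and_eq_true, Bool.not_eq_true', decide_eq_true_eq,
        decide_eq_false_iff_not]
      exact Or.inr ⟨by omega, lt_of_le_of_ne hab.1 hab.2⟩
    · intro a ha b hb
      have hra := pvRnk_in a ((hmem_ord a).mp ha).1
      have hrb : pvRnk b = (pvPreferredOrder.length : Int) :=
        pvRnk_out b ((hmem_rest b).mp ((hsr_mem b).mp hb)).2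
      simp only [pvLexB, Bool.or_eq_true, decide_eq_true_eq]
      exact Or.inl (by omega)
  -- B's output in foldl-insertBy form, pairwise pvLexB
  have hBdef : PySem.List.sorted2 u (fun k => PySem.Dict.getD pvRankD k (pvPreferredOrder.length : Int)) (fun k => k) false
      = u.foldl (fun acc x => PySem.List.insertBy pvLexB x acc) [] := by
    rw [PySem.List.sorted2.eq_def]
    rfl
  have hBpw : (PySem.List.sorted2 u (fun k => PySem.Dict.getD pvRankD k (pvPreferredOrder.length : Int)) (fun k => k) false).Pairwise
      (fun a b => pvLexB a b = true) := by
    rw [hBdef]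
    exact pvFoldl_insertBy_pairwise pvLexB pvLexB_trans pvLexB_total u [] hund
      (by intro x _ h; exact absurd h (List.not_mem_nil)) List.Pairwise.nil
  have hBperm := PySem.List.sorted2_perm u
    (fun k => PySem.Dict.getD pvRankD k (pvPreferredOrder.length : Int)) (fun k => k) false
  -- both are pvLexB-sorted permutations of u, hence equal
  have : ordered ++ sortedRest
      = PySem.List.sorted2 u (fun k => PySem.Dict.getD pvRankD k (pvPreferredOrder.length : Int)) (fun k => k) false :=
    List.Perm.eq_of_pairwise (fun a b _ _ h1 h2 => pvLexB_asymm a b h1 h2) hApw hBpw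
      (hAperm.trans hBperm.symm)
  have hrk : (List.foldl (fun (d : PySem.Dict String Int) (p : Int × String) => d.insert p.2 p.1)
      PySem.Dict.empty (PySem.List.enumerate pvPreferredOrder)) = pvRankD := rfl
  rw [hrk]
  exact this
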